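-- pv_equiv track=rewrite | github.com/hmabubakar313/pypy | array/append_zero_at_end.py | append_zero_at_end
-- ===== SOURCE A (Python) =====
-- def append_zero_at_end(l):
--     zero = 0
--     non_zero = []
--     for i in range(len(l)):
--         if i == 0:
--             zero += 1
--         else:
--             non_zero.append(i)
--
--     non_zero.extend([0] * zero)
--     return non_zero
-- ===== SOURCE B (Python) =====
-- def append_zero_at_end(l):
--     return list(range(1, len(l))) + ([0] if l else [])
-- ===== Notes on version B (the rewrite author's own statement) =====
-- stated objective: simpler
-- what changed: Replaces the index loop with its branch on index zero and two mutable accumulators by a closed-form construction: the range of indices from one to the length, concatenated with a single trailing zero when the list is non-empty.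
import Mathlib
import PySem

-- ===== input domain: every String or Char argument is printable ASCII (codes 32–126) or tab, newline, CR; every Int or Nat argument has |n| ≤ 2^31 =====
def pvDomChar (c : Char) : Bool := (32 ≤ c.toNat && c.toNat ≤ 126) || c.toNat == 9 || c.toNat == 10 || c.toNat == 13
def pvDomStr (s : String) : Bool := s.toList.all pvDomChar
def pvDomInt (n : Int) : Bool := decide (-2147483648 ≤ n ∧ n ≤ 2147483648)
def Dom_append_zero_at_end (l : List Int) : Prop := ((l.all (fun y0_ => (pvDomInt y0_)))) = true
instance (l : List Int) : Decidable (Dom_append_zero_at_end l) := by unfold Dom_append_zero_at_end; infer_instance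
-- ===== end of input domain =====

-- B replaces A's index loop (with its i==0 branch and two accumulators) by a closed-form
-- range-and-concatenate construction; objective: simpler.

-- ===== PORT A =====
-- loop state: (zero, non_zero); for i in range(len(l)): if i == 0: zero += 1 else: non_zero.append(i)
def append_zero_at_end (l : List Int) : List Int :=
  let st := (PySem.List.pyRange 0 l.length 1).foldl
    (fun (st : Int × List Int) i =>
      if i = 0 then (st.1 + 1, st.2) else (st.1, st.2 ++ [i]))
    (0, [])
  st.2 ++ List.replicate st.1.toNat 0

-- ===== PORT B =====
def append_zero_at_end_alt (l : List Int) : List Int :=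
  PySem.List.pyRange 1 l.length 1 ++ (if l ≠ [] then [0] else [])

-- ===== PRECONDITION & SPEC =====
def Spec_append_zero_at_end (l : List Int) (out : List Int) : Prop := out = append_zero_at_end_alt l
instance (l : List Int) (out : List Int) : Decidable (Spec_append_zero_at_end l out) := by unfold Spec_append_zero_at_end; infer_instance

-- ===== CLAIM (what is proved, stated in full; the proofs are below) =====
def Claim_equal_append_zero_at_end : Prop := ∀ (l : List Int), Dom_append_zero_at_end l → Spec_append_zero_at_end l (append_zero_at_end l)

-- ===== LEMMAS AND PROOFS =====

-- Invariant: folding A's step over range(a, b) from state (z, acc), for 1 ≤ a, leaves z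
-- unchanged and appends exactly range(a, b).
lemma pvFoldTail (a b : Int) (z : Int) (acc : List Int) (ha : 1 ≤ a) :
    (PySem.List.pyRange a b 1).foldl
      (fun (st : Int × List Int) i =>
        if i = 0 then (st.1 + 1, st.2) else (st.1, st.2 ++ [i]))
      (z, acc) = (z, acc ++ PySem.List.pyRange a b 1) := by
  by_cases hab : a < b
  · rw [PySem.List.pyRange_one_cons hab]
    simp only [List.foldl_cons]
    rw [if_neg (by omega)]
    rw [pvFoldTail (a + 1) b z (acc ++ [a]) (by omega)]
    simp
  · have h1 : PySem.List.pyRange a b 1 = [] := by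
      simp [PySem.List.pyRange_one]
      omega
    simp [h1]
termination_by (b - a).toNat
decreasing_by omega

-- ===== VERDICT (by name: the statement is the Claim_ definition above) =====
theorem append_zero_at_end_spec : Claim_equal_append_zero_at_end := by
  intro l _
  show append_zero_at_end l = append_zero_at_end_alt l
  unfold append_zero_at_end append_zero_at_end_alt
  cases l with
  | nil => decide
  | cons x xs =>
    have hlen : (0 : Int) < (x :: xs).length := by
      simp
    rw [PySem.List.pyRange_one_cons hlen, List.foldl_cons]
    norm_num
    rw [pvFoldTail 1 ((xs.length : Int) + 1) 1 [] le_rfl]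
    simp
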